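-- pv_equiv track=rewrite | github.com/jpfa1406/ProjetoA | utils.py | extract_route
-- ===== SOURCE A (Python) =====
-- def extract_route(requisicao):
--     c = 0
--     g = ''
--     rota = ''
--     stop = False
--     for k in requisicao:
--         if not stop:
--             if k == ' ':
--                 c = c + 1
--             if c == 1:
--                 rota = rota + k
--             if k == ' ' and c > 1:
--                 stop = True
--
--     rota = rota[2:]
--
--     return rota
-- ===== SOURCE B (Python) =====
-- def extract_route(requisicao):
--     i1 = requisicao.find(' ')
--     if i1 == -1:
--         return ''
--     i2 = requisicao.find(' ', i1 + 1)
--     if i2 == -1: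
--         return requisicao[i1 + 2:]
--     return requisicao[i1 + 2:i2]
-- ===== Notes on version B (the rewrite author's own statement) =====
-- stated objective: faster
-- what changed: Replaces A's char-by-char counter/flag state machine (space counter c, string accumulator rota built by repeated concatenation, stop flag, then rota[2:]) by two C-level str.find calls locating the first and second space and one direct slice requisicao[i1+2:i2], preserving A's +2 offset exactly.
import Mathlib
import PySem

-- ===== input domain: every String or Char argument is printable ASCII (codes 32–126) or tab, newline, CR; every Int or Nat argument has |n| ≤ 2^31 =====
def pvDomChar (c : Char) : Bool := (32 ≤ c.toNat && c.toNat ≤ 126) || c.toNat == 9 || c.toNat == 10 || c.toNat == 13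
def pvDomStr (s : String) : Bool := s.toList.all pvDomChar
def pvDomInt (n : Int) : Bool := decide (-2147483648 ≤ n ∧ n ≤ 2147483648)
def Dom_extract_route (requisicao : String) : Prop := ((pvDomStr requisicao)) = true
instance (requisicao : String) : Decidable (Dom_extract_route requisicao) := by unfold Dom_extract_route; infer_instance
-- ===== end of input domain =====

-- B replaces A's counter/flag state machine by two find calls and one slice (measured faster; same behaviour incl. the +2 offset).

-- ===== PORT A =====
-- state (c, rota, stop); one step of A's for-loop body, branches in source order
def extractRouteStep (st : Int × List Char × Bool) (k : Char) : Int × List Char × Bool :=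
  if st.2.2 then st
  else
    let c := if k = ' ' then st.1 + 1 else st.1
    let rota := if c = 1 then st.2.1 ++ [k] else st.2.1
    let stop := if k = ' ' ∧ c > 1 then true else st.2.2
    (c, rota, stop)

def extract_route (requisicao : String) : String :=
  let st := requisicao.toList.foldl extractRouteStep (0, [], false)
  String.ofList (PySem.List.slice st.2.1 (some 2) none)   -- rota[2:]

-- ===== PORT B =====
def extract_route_alt (requisicao : String) : String :=
  let i1 := PySem.Str.find requisicao " "
  if i1 = -1 then ""
  else
    let i2 := PySem.Str.findFrom requisicao " " (i1 + 1)
    if i2 = -1 then PySem.Str.slice requisicao (some (i1 + 2)) none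
    else PySem.Str.slice requisicao (some (i1 + 2)) (some i2)

-- ===== PRECONDITION & SPEC =====
def Spec_extract_route (requisicao : String) (out : String) : Prop := out = extract_route_alt requisicao
instance (requisicao : String) (out : String) : Decidable (Spec_extract_route requisicao out) := by unfold Spec_extract_route; infer_instance

-- ===== CLAIM (what is proved, stated in full; the proofs are below) =====
def Claim_equal_extract_route : Prop := ∀ (requisicao : String), Dom_extract_route requisicao → Spec_extract_route requisicao (extract_route requisicao)

-- ===== LEMMAS AND PROOFS =====

-- once stop is set, the loop body is the identity
theorem extractRouteStep_stopped (l : List Char) (st : Int × List Char × Bool)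
    (h : st.2.2 = true) : l.foldl extractRouteStep st = st := by
  induction l with
  | nil => rfl
  | cons x xs ih => simpa [extractRouteStep, h] using ih

-- before the first space the state stays (0, [], false)
theorem extractRouteStep_phase0 (l : List Char) (h : ∀ k ∈ l, k ≠ ' ') :
    l.foldl extractRouteStep (0, [], false) = (0, [], false) := by
  induction l with
  | nil => rfl
  | cons x xs ih =>
    have hx : x ≠ ' ' := h x (by simp)
    simp only [List.foldl_cons, extractRouteStep, hx]
    simpa [extractRouteStep, hx] using ih (fun k hk => h k (by simp [hk]))

-- between the two spaces every char is appended to rota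
theorem extractRouteStep_phase1 (l : List Char) (rota : List Char)
    (h : ∀ k ∈ l, k ≠ ' ') :
    l.foldl extractRouteStep (1, rota, false) = (1, rota ++ l, false) := by
  induction l generalizing rota with
  | nil => simp
  | cons x xs ih =>
    have hx : x ≠ ' ' := h x (by simp)
    have := ih (rota ++ [x]) (fun k hk => h k (by simp [hk]))
    simp only [List.foldl_cons, extractRouteStep, hx]
    simpa [extractRouteStep, hx] using this

-- first-space decomposition of a list containing ' '
theorem exists_space_split (s : List Char) (h : ' ' ∈ s) :
    ∃ p r, s = p ++ ' ' :: r ∧ ∀ k ∈ p, k ≠ ' ' := by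
  induction s with
  | nil => cases h
  | cons x xs ih =>
    by_cases hx : x = ' '
    · exact ⟨[], xs, by simp [hx], by simp⟩
    · obtain ⟨p, r, hpr, hp⟩ := ih (by
        rcases List.mem_cons.mp h with h' | h'
        · exact (hx h'.symm).elim
        · exact h')
      exact ⟨x :: p, r, by simp [hpr], by
        intro k hk
        rcases List.mem_cons.mp hk with h' | h'
        · simpa [h'] using hx
        · exact hp k h'⟩

-- A's rota (before the final slice) over p ++ ' ' :: r, ' ' ∉ p
theorem extract_route_rota (p r : List Char) (hp : ∀ k ∈ p, k ≠ ' ') :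
    ((p ++ ' ' :: r).foldl extractRouteStep (0, [], false)).2.1
      = ' ' :: r.takeWhile (· ≠ ' ') := by
  rw [List.foldl_append, extractRouteStep_phase0 p hp]
  simp only [List.foldl_cons]
  have hstep : extractRouteStep (0, [], false) ' ' = (1, [' '], false) := by
    simp [extractRouteStep]
  rw [hstep]
  by_cases hr : ' ' ∈ r
  · obtain ⟨u, v, huv, hu⟩ := exists_space_split r hr
    subst huv
    rw [List.foldl_append, extractRouteStep_phase1 u [' '] hu]
    have h2 : extractRouteStep (1, ' ' :: u, false) ' ' = (2, ' ' :: u, true) := by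
      simp [extractRouteStep]
    simp only [List.foldl_cons, List.cons_append, List.nil_append]
    rw [extractRouteStep_stopped v _ rfl, h2]
    have htw : (u ++ ' ' :: v).takeWhile (· ≠ ' ') = u := by
      rw [List.takeWhile_append_of_pos]
      · simp
      · intro k hk; simpa using hu k hk
    simp only [ne_eq, decide_not] at htw
    simp [htw]
  · have hu : ∀ k ∈ r, k ≠ ' ' := fun k hk he => hr (he ▸ hk)
    rw [extractRouteStep_phase1 r [' '] hu]
    have htw : r.takeWhile (· ≠ ' ') = r := List.takeWhile_eq_self_iff.mpr (by
      intro k hk; simpa using hu k hk)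
    simp only [ne_eq, decide_not] at htw
    simp [htw]

-- find of the single-char " " over p ++ ' ' :: r, ' ' ∉ p, is p.length
theorem find_space_split (p r : List Char) (hp : ∀ k ∈ p, k ≠ ' ') :
    PySem.Chars.find (p ++ ' ' :: r) [' '] = (p.length : Int) := by
  have hinf : [' '] <:+: (p ++ ' ' :: r) :=
    (List.singleton_infix_iff ' ' _).mpr (by simp)
  have hnn : 0 ≤ PySem.Chars.find (p ++ ' ' :: r) [' '] :=
    (PySem.Chars.find_nonneg_iff _ _).mpr hinf
  obtain ⟨hpre, hmin⟩ := PySem.Chars.find_spec hnn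
  set n := (PySem.Chars.find (p ++ ' ' :: r) [' ']).toNat with hn
  have hne : n = p.length := by
    rcases Nat.lt_trichotomy n p.length with h | h | h
    · exfalso
      obtain ⟨t, ht⟩ := hpre
      have h1 : ((p ++ ' ' :: r).drop n).head? = some ' ' := by rw [← ht]; rfl
      rw [List.head?_drop, List.getElem?_append_left h] at h1
      exact hp ' ' (List.mem_of_getElem? h1) rfl
    · exact h
    · exact absurd ⟨r, by simp⟩ (hmin p.length h)
  omega

theorem toList_drop_split (p r : List Char) :
    (p ++ ' ' :: r).drop (p.length + 2) = r.drop 1 := by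
  induction p with
  | nil => rfl
  | cons x xs ih => simp [ih]

theorem extract_route_eq (s : String) : extract_route s = extract_route_alt s := by
  apply String.toList_inj.mp
  by_cases hmem : ' ' ∈ s.toList
  · obtain ⟨p, r, hpr, hp⟩ := exists_space_split s.toList hmem
    have hfind : PySem.Str.find s " " = (p.length : Int) := by
      rw [PySem.Str.find_eq, hpr]
      exact find_space_split p r hp
    have hne : (p.length : Int) ≠ -1 := by omega
    have hlen : p.length + 1 ≤ s.toList.length := by
      rw [hpr]; simp
    have hdropr : s.toList.drop (p.length + 1) = r := by
      rw [hpr]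
      simpa using List.drop_left' (l₂ := ' ' :: r) (rfl)
    have hA : (extract_route s).toList = (r.takeWhile (· ≠ ' ')).drop 1 := by
      simp only [extract_route, String.toList_ofList]
      rw [hpr, extract_route_rota p r hp,
        PySem.List.slice_from _ (by norm_num : (0:Int) ≤ 2)]
      rfl
    have hFF : PySem.Str.findFrom s " " ((p.length : Int) + 1)
        = if PySem.Chars.find r [' '] = -1 then -1
          else ((p.length : Int) + 1) + PySem.Chars.find r [' '] := by
      rw [PySem.Str.findFrom_eq]
      have hcast : ((p.length : Int) + 1) = ((p.length + 1 : Nat) : Int) := by omega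
      rw [hcast, PySem.Chars.findFrom_natCast s.toList (" ".toList) (p.length + 1) hlen, hdropr,
        (show (" " : String).toList = [' '] from rfl)]
    by_cases hr : ' ' ∈ r
    · obtain ⟨u, v, huv, hu⟩ := exists_space_split r hr
      have hfr : PySem.Chars.find r [' '] = (u.length : Int) := by
        rw [huv]; exact find_space_split u v hu
      have htw : r.takeWhile (· ≠ ' ') = u := by
        rw [huv, List.takeWhile_append_of_pos]
        · simp
        · intro k hk; simpa using hu k hk
      have hi2 : PySem.Str.findFrom s " " ((p.length : Int) + 1)
          = (p.length : Int) + 1 + (u.length : Int) := by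
        rw [hFF, hfr, if_neg (by omega)]
      simp only [extract_route_alt, hfind, hi2, if_neg hne]
      rw [if_neg (show ¬((p.length : Int) + 1 + (u.length : Int) = -1) by omega),
        PySem.Str.toList_slice, PySem.Chars.slice_eq_listSlice,
        PySem.List.slice_toNat _ (by omega) (by omega)]
      have ha : ((p.length : Int) + 2).toNat = p.length + 2 := by omega
      have hb : ((p.length : Int) + 1 + (u.length : Int)).toNat = p.length + 1 + u.length := by omega
      rw [ha, hb, hA, htw, hpr, huv]
      rw [toList_drop_split p (u ++ ' ' :: v)]
      cases u with
      | nil => simp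
      | cons x u' =>
        have hlu : p.length + 1 + (x :: u').length - (p.length + 2) = u'.length := by
          simp; omega
        rw [hlu]
        simp only [List.cons_append, List.drop_succ_cons, List.drop_zero]
        exact (List.take_left' (rfl : u'.length = u'.length)).symm
    · have hfr : PySem.Chars.find r [' '] = -1 :=
        (PySem.Chars.find_eq_neg_one_iff _ _).mpr
          (fun h => hr ((List.singleton_infix_iff ' ' r).mp h))
      have htw : r.takeWhile (· ≠ ' ') = r := List.takeWhile_eq_self_iff.mpr (by
        intro k hk
        simpa using (show k ≠ ' ' from fun he => hr (he ▸ hk)))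
      have hi2 : PySem.Str.findFrom s " " ((p.length : Int) + 1) = -1 := by
        rw [hFF, hfr]; simp
      simp only [extract_route_alt, hfind, hi2, if_neg hne]
      rw [if_pos trivial, PySem.Str.toList_slice, PySem.Chars.slice_eq_listSlice,
        PySem.List.slice_from _ (by omega : (0:Int) ≤ (p.length : Int) + 2)]
      have ha : ((p.length : Int) + 2).toNat = p.length + 2 := by omega
      rw [ha, hA, htw, hpr, toList_drop_split p r]
  · have hfind : PySem.Str.find s " " = -1 := by
      rw [PySem.Str.find_eq]
      exact (PySem.Chars.find_eq_neg_one_iff _ _).mpr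
        (fun h => hmem ((List.singleton_infix_iff ' ' s.toList).mp h))
    have hA : (extract_route s).toList = [] := by
      simp only [extract_route, String.toList_ofList]
      rw [extractRouteStep_phase0 s.toList (fun k hk he => hmem (he ▸ hk))]
      rfl
    simp only [extract_route_alt, hfind]
    rw [if_pos trivial, hA]; rfl

-- ===== VERDICT (by name: the statement is the Claim_ definition above) =====
theorem extract_route_spec : Claim_equal_extract_route := by
  intro s _
  exact extract_route_eq s
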